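/-
  THE CONTRACTS OF THE FLOOR FUNCTIONS USED AT DECODE TIME AND OF `vorbis_decode_packet_rest` (c/stb_vorbis_fixed.c; design/CONTRACTS.md
  entries 84 `neighbors`, 27 `predict_point`, 28 `draw_line`, 29 `do_floor`, 62 `vorbis_decode_packet_rest`).

  PART 1 (this section): the four small functions, as whole-function `Spec`s.

      s32 r                       the SIGNED value of the low half of a register: `(Word.part .w32 r).toInt` (the form of the walker's
                                  branch hypotheses; `Vorbis.Spec.part32_toInt` turns it into `sint32 (r.toNat % 2 ^ 32)`)
      neighbors.spec              shadow layer only (it is called at setup time by start_decoder: the two existential implications of its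
                                  post are what `Vorbis.neighbors_post` turns into FL10)
      predict_point.spec          no memory at all: the `idiv` must not fault — pre `0 ≤ x0 < x1 < 2^31`
      draw_line.spec              the `idiv` (executed unconditionally) must not fault; writes `output[x0 .. min(x1, n))`
      do_floor.spec               PURELY STRUCTURAL: OB1, FL1–FL3, FL8, FL9 (`FloorsOK`), MP2 / MP3 / MP5 / MP6 of the mapping record, a
                                  `finalY` block big enough for every floor, the `target` block; writes `target[0 .. n >> 1)` only.
                                  No fact about the CONTENTS of `finalY` (FIX 11), no sortedness.

  PART 2: `vorbis_decode_packet_rest`: the decode-time invariant is `DecodeInv` (Vorbis/Spec/DecodeInv.lean: the point FB + SEP + the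
  hand-over carrier + "`*f` and the sample buffers are ARENA blocks" + SH7 + the named sizes of the `finalY` blocks), the arguments
  `Args`, the footprint `writes`, and the `Spec` (a PROTECTED frame: `Vorbis.Frames.vorbis_decode_packet_rest`).
  PART 3: the assertion family of its 16 segments: `Frame` ⊂ `Stable` (CONTRACTS' STABLE) ⊂ `At2 … At16` (one assertion per
  segment ENTRY address; segment .7 has two: `At7a`, `At7b`), all relative to the function's entry state `u`.
  PART 4: `Seg1 … Seg16`, the statements of the segments (the unit statements Vorbis/Spec/Units/vorbis_decode_packet_rest_<k>.lean
  quote these constants; the composition is PROVED in Vorbis/Spec/PacketRestComp.lean).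
  Lemmas for the workers (the decode-time frame of `DecodeInv`, the footprint): Vorbis/Spec/PacketRestFrame.lean. Interface checks
  against the callers' and callees' Specs: Vorbis/Spec/PacketRestTest.lean.

  GHOST PARAMETERS. Every Spec: `others`, `frames` (the live objects of the shadow invariant). do_floor in addition: `Blk` (the
  block predicate of the decoder invariant, abstract), `mi` (the index of the mapping record). vorbis_decode_packet_rest: `len`
  (the input's length), `Ar` (the arena: the block predicate is the run's, `runBlk Ar (fixedBlocks len)`), `stored`, `room`
  (decode_all's counters, carried), `mode` (the index of `m`), `ysz` (the sizes of the `finalY` blocks).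
-/
import Vorbis.Spec.Basic
import Vorbis.Spec.Common
import Vorbis.Spec.Leaves
import Vorbis.Spec.Leaves2
import Vorbis.Spec.Libc
import Vorbis.Spec.LibcMisc
import Vorbis.Invariant
import Vorbis.Spec.DecodeInv
namespace Vorbis.Spec
open X86 X86.User Asan

/-! ### neighbors (CONTRACTS 84) -/

/-- **`neighbors(rdi = x : uint16*, esi = n : int, rdx = plow : int*, rcx = phigh : int*)`** (CONTRACTS 84; stb_vorbis_fixed.c
1330–1339; called by start_decoder's loop 4026 with `x = g->Xlist`, `n = j`, `plow = &low`, `phigh = &hi`).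

PRE: `0 < n`, `x[0..n]` = `2·(n+1)` bytes inside one live object, the dwords at `plow` and `phigh` each inside a live object, both
disjoint from `x[0..n]` AND FROM EACH OTHER (FINDING: CONTRACTS does not ask the last; the stated post is false for `plow = phigh`).
NO case `n ≤ 0` (freeze-7, farm report CONTRACT-PRE of the unit `neighbors`): a pre that says nothing about `plow` / `phigh` lets
them point into the function's own frame (`esi = 0`, `rdx = rsp − 80` = the slot of `low`, which the prologue sets to `−1`), and
then "`*plow` unchanged" is false. The only caller has `2 ≤ n = j < values ≤ 250`.

POST, with `X i = x[i]` read in the ENTRY memory (the function does not write `x[0..n]`) and `xn = X n`: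
`(∃ i < n, X i < xn) → *plow < n ∧ X (*plow) < xn`, otherwise `*plow` is unchanged; `(∃ i < n, X i > xn) → *phigh < n ∧ X (*phigh) > xn`,
otherwise `*phigh` is unchanged. (`*plow`, `*phigh` read as unsigned dwords of the RETURN memory: they are indices `0 ≤ · < n`.)
Exactly the three hypotheses `hlow`, `hlow0`, `hhi` of `Vorbis.neighbors_post`. No shadow byte is written.
Stack: six pushes, `sub rsp, 0x28`, the return address of a check call, that routine's worst case: 112 bytes. -/
def neighbors.spec (others : List Obj) (frames : List (Nat × FrameLayout)) : Spec where
  pre u :=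
    ShadowPre others frames u ∧
    0 < s32 (u.reg .rsi) ∧
    LiveIn others frames (u.reg .rdi).toNat (2 * ((s32 (u.reg .rsi)).toNat + 1)) ∧
    LiveIn others frames (u.reg .rdx).toNat 4 ∧
    LiveIn others frames (u.reg .rcx).toNat 4 ∧
    ((u.reg .rdx).toNat + 4 ≤ (u.reg .rdi).toNat ∨
       (u.reg .rdi).toNat + 2 * ((s32 (u.reg .rsi)).toNat + 1) ≤ (u.reg .rdx).toNat) ∧
    ((u.reg .rcx).toNat + 4 ≤ (u.reg .rdi).toNat ∨
       (u.reg .rdi).toNat + 2 * ((s32 (u.reg .rsi)).toNat + 1) ≤ (u.reg .rcx).toNat) ∧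
    ((u.reg .rdx).toNat + 4 ≤ (u.reg .rcx).toNat ∨ (u.reg .rcx).toNat + 4 ≤ (u.reg .rdx).toNat)
  post u v :=
    ShadowUntouched u.mem v.mem ∧
    ((∃ i : Nat, (i : Int) < s32 (u.reg .rsi) ∧
          u.mem.u16 ((u.reg .rdi).toNat + 2 * i) < u.mem.u16 ((u.reg .rdi).toNat + 2 * (s32 (u.reg .rsi)).toNat)) →
        ((v.mem.u32 (u.reg .rdx).toNat : Int) < s32 (u.reg .rsi) ∧
          u.mem.u16 ((u.reg .rdi).toNat + 2 * v.mem.u32 (u.reg .rdx).toNat)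
            < u.mem.u16 ((u.reg .rdi).toNat + 2 * (s32 (u.reg .rsi)).toNat))) ∧
    (¬ (∃ i : Nat, (i : Int) < s32 (u.reg .rsi) ∧
          u.mem.u16 ((u.reg .rdi).toNat + 2 * i) < u.mem.u16 ((u.reg .rdi).toNat + 2 * (s32 (u.reg .rsi)).toNat)) →
        v.mem.u32 (u.reg .rdx).toNat = u.mem.u32 (u.reg .rdx).toNat) ∧
    ((∃ i : Nat, (i : Int) < s32 (u.reg .rsi) ∧
          u.mem.u16 ((u.reg .rdi).toNat + 2 * (s32 (u.reg .rsi)).toNat) < u.mem.u16 ((u.reg .rdi).toNat + 2 * i)) →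
        ((v.mem.u32 (u.reg .rcx).toNat : Int) < s32 (u.reg .rsi) ∧
          u.mem.u16 ((u.reg .rdi).toNat + 2 * (s32 (u.reg .rsi)).toNat)
            < u.mem.u16 ((u.reg .rdi).toNat + 2 * v.mem.u32 (u.reg .rcx).toNat))) ∧
    (¬ (∃ i : Nat, (i : Int) < s32 (u.reg .rsi) ∧
          u.mem.u16 ((u.reg .rdi).toNat + 2 * (s32 (u.reg .rsi)).toNat) < u.mem.u16 ((u.reg .rdi).toNat + 2 * i)) →
        v.mem.u32 (u.reg .rcx).toNat = u.mem.u32 (u.reg .rcx).toNat)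
  frame := 112
  writes u := [⟨(u.reg .rdx).toNat, (u.reg .rdx).toNat + 4⟩, ⟨(u.reg .rcx).toNat, (u.reg .rcx).toNat + 4⟩]

@[vspec] theorem neighbors.spec_frame (others : List Obj) (frames : List (Nat × FrameLayout)) :
    (neighbors.spec others frames).frame = 112 := id rfl

@[vspec] theorem neighbors.spec_writes (others : List Obj) (frames : List (Nat × FrameLayout)) (u : State) :
    (neighbors.spec others frames).writes u =
      [⟨(u.reg .rdx).toNat, (u.reg .rdx).toNat + 4⟩, ⟨(u.reg .rcx).toNat, (u.reg .rcx).toNat + 4⟩] := id rfl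

/-! ### predict_point (CONTRACTS 27) -/

/-- **`predict_point(edi = x, esi = x0, edx = x1, ecx = y0, r8d = y1)`** (CONTRACTS 27; stb_vorbis_fixed.c 1962–1970). No memory
access at all; the only thing that can go wrong is the `idiv r13d` (`err / adx`, `adx = x1 − x0`).

PRE: `0 ≤ x0 < x1 < 2^31` as signed `int`s (stated on the unsigned low halves: `x0 < x1 < 2^31`). This is what the ONLY caller has
(vorbis_decode_packet_rest, line 3271: `x0 = Xlist[low] ≤ Xlist[j] < Xlist[high] = x1`, zero-extended `uint16`s, FL10: `Floor1OK.adx_pos`) and it is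
SUFFICIENT: `0 < adx < 2^31`, and a 32-bit dividend divided by a positive divisor has a quotient that fits (the quotient `−2^31`
for `err = INT_MIN`, `adx = 1` fits). CONTRACTS' weaker form (`adx ≠ 0 ∧ ¬(err = INT_MIN ∧ adx = −1)`) is implied by it.

POST: eax is any `int`; no shadow byte is written. Stack: five pushes, the return address of the call of `abs`: 48 bytes. -/
def predict_point.spec (others : List Obj) (frames : List (Nat × FrameLayout)) : Spec where
  pre u :=
    ShadowPre others frames u ∧
    (u.reg .rsi).toNat % 2 ^ 32 < (u.reg .rdx).toNat % 2 ^ 32 ∧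
    (u.reg .rdx).toNat % 2 ^ 32 < 2 ^ 31
  post u v :=
    ShadowUntouched u.mem v.mem ∧
    (v.reg .rax).toNat < 2 ^ 32
  frame := 48
  writes _ := []

@[vspec] theorem predict_point.spec_frame (others : List Obj) (frames : List (Nat × FrameLayout)) :
    (predict_point.spec others frames).frame = 48 := id rfl

@[vspec] theorem predict_point.spec_writes (others : List Obj) (frames : List (Nat × FrameLayout)) (u : State) :
    (predict_point.spec others frames).writes u = [] := id rfl

/-! ### draw_line (CONTRACTS 28) -/

/-- **`draw_line(rdi = output : float*, esi = x0, edx = y0, ecx = x1, r8d = y1, r9d = n)`** (CONTRACTS 28; stb_vorbis_fixed.c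
2061–2108). `output[x] *= inverse_db_table[y & 255]` for `x0 ≤ x < min(x1, n)`.

PRE. The `idiv r15d` (`dy / adx`, `dy = y1 − y0`, `adx = x1 − x0`) at the top is executed UNCONDITIONALLY: `x1 ≠ x0`, neither
subtraction wraps, and `dy ≠ INT_MIN` (stated on the signed values: `−2^31 < y1 − y0 < 2^31`, `−2^31 ≤ x1 − x0 < 2^31`; the only
caller, do_floor, has `0 ≤ x0, x1 ≤ 65535` and `|y0|, |y1| ≤ 32768·255`: `Vorbis.mul_i16_u8_bound`). If anything is written at all
(`x0 < min(x1, n)`): `0 ≤ x0`, and `output[0 .. n)` = `4·n` bytes inside one live object. The global `inverse_db_table` is a live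
object (SH5): its index is a zero-extended byte (`movzx r13d, r12b`), so no bound on `y0`, `y1` is needed.

POST: no shadow byte is written; only `output[x0 .. min(x1, n))` is (floats, opaque); xmm0 is clobbered. The window is empty when
`min(x1, n) ≤ x0`.
Stack: six pushes, `sub rsp, 0x28`, the return address of a check call, that routine's worst case: 112 bytes. -/
def draw_line.spec (others : List Obj) (frames : List (Nat × FrameLayout)) : Spec where
  pre u :=
    ShadowPre others frames u ∧
    Vorbis.Globals.inverse_db_table.obj ∈ others ∧
    s32 (u.reg .rcx) ≠ s32 (u.reg .rsi) ∧
    (-(2 : Int) ^ 31 ≤ s32 (u.reg .rcx) - s32 (u.reg .rsi) ∧ s32 (u.reg .rcx) - s32 (u.reg .rsi) < 2 ^ 31) ∧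
    (-(2 : Int) ^ 31 < s32 (u.reg .r8) - s32 (u.reg .rdx) ∧ s32 (u.reg .r8) - s32 (u.reg .rdx) < 2 ^ 31) ∧
    (s32 (u.reg .rsi) < min (s32 (u.reg .rcx)) (s32 (u.reg .r9)) →
      (0 ≤ s32 (u.reg .rsi) ∧ LiveIn others frames (u.reg .rdi).toNat (4 * (s32 (u.reg .r9)).toNat)))
  post u v :=
    ShadowUntouched u.mem v.mem
  frame := 112
  writes u :=
    [⟨(u.reg .rdi).toNat + 4 * (s32 (u.reg .rsi)).toNat,
      (u.reg .rdi).toNat + 4 * (min (s32 (u.reg .rcx)) (s32 (u.reg .r9))).toNat⟩]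

@[vspec] theorem draw_line.spec_frame (others : List Obj) (frames : List (Nat × FrameLayout)) :
    (draw_line.spec others frames).frame = 112 := id rfl

@[vspec] theorem draw_line.spec_writes (others : List Obj) (frames : List (Nat × FrameLayout)) (u : State) :
    (draw_line.spec others frames).writes u =
      [⟨(u.reg .rdi).toNat + 4 * (s32 (u.reg .rsi)).toNat,
        (u.reg .rdi).toNat + 4 * (min (s32 (u.reg .rcx)) (s32 (u.reg .r9))).toNat⟩] := id rfl

/-! ### do_floor (CONTRACTS 29) -/

/-- **`do_floor(rdi = f, rsi = map : Mapping*, edx = i, ecx = n, r8 = target : float*, r9 = finalY : int16*, [rsp+8] = step2_flag)`**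
(CONTRACTS 29; stb_vorbis_fixed.c 3099–3135, with FIX 11: `inverse_db_table[ly & 255]`). The seventh argument is never read.

PRE, PURELY STRUCTURAL (ghosts: `Blk`, the block predicate of the decoder invariant; `mi`, the index of the mapping record):
* `BlkOK Blk`, `BlkLive Blk (Live …)`: allocated blocks are lawful and live; OB1: `*f` is an allocated block;
* FL1–FL3 and FL4–FL10 of every floor (`FloorsOK`; used: FL3 — the `error` arm at 0x108a86 is dead —, FL8 `2 ≤ values ≤ 250`, FL9
  `sorted_order[q] < values`); MP1–MP6 (`MappingOK`; used for the record `map = &f->mapping[mi]`: MP2 the `chan` block, MP3 / MP5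
  `mux < submaps ≤ 16`, MP6 `submap_floor[s] < floor_count`); `0 ≤ i < channels`;
* `finalY` is the base of an allocated block of `sz` bytes with `2·values ≤ sz` for every floor (what `FY1.block` gives for
  `finalY = f->finalY[i]`): NOTHING about its contents;
* `n2 = n >> 1` (arithmetic shift: `n / 2` rounded down): `n2 ≤ 0`, or `target[0 .. n2)` = `4·n2` bytes lie inside ONE live
  object (`LiveIn`: the form draw_line's and every pilot contract's precondition has; a bytewise-live allocated block does not
  give it) and are disjoint from the floor block (the ONLY block do_floor reads again after its first store: `values`,
  `sorted_order`, `floor1_multiplier`, `Xlist` are re-read in the loop). FINDING: CONTRACTS also asks the target disjoint from the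
  `finalY` block, the `chan` block, the mapping block and `*f`; none of these is needed (the last three are read before the
  first store only; the CONTENTS of `finalY` are irrelevant), and "disjoint from the `finalY` block" cannot be established from
  the invariant (`Separated` does not separate two sample buffers);
* the global `inverse_db_table` is a live object (SH5).

POST: eax = 1 (rax = 1); no shadow byte is written; only `target[0 .. max(n2, 0))` is written (floats, opaque).
Stack: six pushes, `sub rsp, 0x18`, the return address of the call of draw_line and its 112 bytes: 192 bytes. -/
def do_floor.spec (others : List Obj) (frames : List (Nat × FrameLayout)) (Blk : Block → Prop) (mi : Nat) : Spec where
  pre u :=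
    ShadowPre others frames u ∧
    BlkOK Blk ∧
    BlkLive Blk (Asan.Live (stackObjs frames ++ others)) ∧
    Blk (objBlock (u.reg .rdi).toNat) ∧
    FloorsOK Blk u.mem (u.reg .rdi).toNat ∧
    MappingOK Blk u.mem (u.reg .rdi).toNat ∧
    (mi : Int) < stb_vorbis.mapping_count u.mem (u.reg .rdi).toNat ∧
    (u.reg .rsi).toNat = stb_vorbis.mapping_at u.mem (u.reg .rdi).toNat mi ∧
    (0 ≤ s32 (u.reg .rdx) ∧ s32 (u.reg .rdx) < stb_vorbis.channels u.mem (u.reg .rdi).toNat) ∧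
    (∃ sz : Nat, Blk ⟨(u.reg .r9).toNat, sz⟩ ∧
      ∀ g : Nat, IsFloor u.mem (u.reg .rdi).toNat g → 2 * Floor1.values u.mem g ≤ (sz : Int)) ∧
    (s32 (u.reg .rcx) / 2 ≤ 0 ∨
      (LiveIn others frames (u.reg .r8).toNat (4 * (s32 (u.reg .rcx) / 2).toNat) ∧
        (Block.mk (u.reg .r8).toNat (4 * (s32 (u.reg .rcx) / 2).toNat)).disjoint (floorBlock u.mem (u.reg .rdi).toNat))) ∧
    Vorbis.Globals.inverse_db_table.obj ∈ others
  post u v :=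
    v.reg .rax = 1 ∧
    ShadowUntouched u.mem v.mem
  frame := 192
  writes u := [⟨(u.reg .r8).toNat, (u.reg .r8).toNat + 4 * (s32 (u.reg .rcx) / 2).toNat⟩]

@[vspec] theorem do_floor.spec_frame (others : List Obj) (frames : List (Nat × FrameLayout)) (Blk : Block → Prop) (mi : Nat) :
    (do_floor.spec others frames Blk mi).frame = 192 := id rfl

@[vspec] theorem do_floor.spec_writes (others : List Obj) (frames : List (Nat × FrameLayout)) (Blk : Block → Prop) (mi : Nat)
    (u : State) :
    (do_floor.spec others frames Blk mi).writes u =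
      [⟨(u.reg .r8).toNat, (u.reg .r8).toNat + 4 * (s32 (u.reg .rcx) / 2).toNat⟩] := id rfl


/-! ## PART 2: vorbis_decode_packet_rest (CONTRACTS 62) -/

namespace vorbis_decode_packet_rest

/-! ### The decode-time invariant at a cut point of the function

THE DECODE-TIME INVARIANT is `Vorbis.Spec.DecodeInv others frames len Ar stored room ysz mem f` (Vorbis/Spec/DecodeInv.lean: the one
invariant of every decode-time function; the block predicate is `RunBlk Ar len` = `runBlk Ar (fixedBlocks len)`, Vorbis/Spec/Common.lean).
At the function's boundary `frames` are the caller's; at a cut point inside, the function's own frame is in front (`framesIn`).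
`fb` is the program point FB: the MUTABLE part — `Bits`, W1, M7, ADO — is restated with the memory of every cut point; the CONFIG part
and `sep` are carried by `DecodeInv.frame_stores` (every span of the function's footprint is a hole of `*f`, lies in a sample buffer,
or is off every allocated block). What this function uses of it: `h.objLive`, `h.chanLive` (the `LiveIn` forms of `memset`, `error`,
`draw_line`, decode_residue's `Args.buf`, the bit reader), `h.books` (`BookApart`), `h.log2` / `h.range` (SH7), `h.g_range` / `h.g_log2`
/ `h.g_db` (SH5 as objects), `h.fy` (the named sizes of the `finalY` blocks: the footprint), `h.offStack` / `h.offGap` / `h.arenaText`. -/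

/-! ### The arguments -/

/-- `f`: the first argument. -/
abbrev fOf (u : State) : Nat := (u.reg .rdi).toNat

/-- `len : int*`: the second argument. -/
abbrev lenOf (u : State) : Nat := (u.reg .rsi).toNat

/-- `m : Mode*`: the third argument. -/
abbrev mOf (u : State) : Nat := (u.reg .rdx).toNat

/-- `left_start : int`: the fourth argument. -/
abbrev lsOf (u : State) : Int := s32 (u.reg .rcx)

/-- `right_start : int`: the sixth argument (`left_end`, the fifth, is never read). -/
abbrev rsOf (u : State) : Int := s32 (u.reg .r9)

/-- `right_end : int`: the seventh argument, the dword at `[entry rsp + 8]` (read in place at the steady `[rsp + 0xbc0]`, never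
copied). -/
def reOf (u : State) : Int := sint32 (u.mem.readLE (u.reg .rsp + 8) 4)

/-- `p_left : int*`: the eighth argument, the qword at `[entry rsp + 16]` (the steady `[rsp + 0xbc8]`). -/
def pLeftOf (u : State) : Nat := u.mem.readLE (u.reg .rsp + 16) 8

/-- `n = f->blocksize[m->blockflag]`, read in the memory `mem`, as a number (M2: `blocksize[b] = bsize b`). -/
def nOf (mem : Mem) (f m : Nat) : Nat := bsize mem f (Mode.blockflag mem m)

/-- The block size of the mode as the window arithmetic (W2, W3) takes it: `blocksize_0` or `blocksize_1` (the form of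
`Top.DecodedMode`; equal to `nOf` as an integer: HD3 makes both positive). -/
def nIntOf (mem : Mem) (f m : Nat) : Int :=
  if Mode.blockflag mem m = 0 then stb_vorbis.blocksize_0 mem f else stb_vorbis.blocksize_1 mem f

/-- `map = &f->mapping[m->mapping]`, read in the memory `mem`. -/
def mapOf (mem : Mem) (f m : Nat) : Nat := stb_vorbis.mapping_at mem f (Mode.mapping mem m)

/-- **What the precondition says of the arguments** (CONTRACTS 62, rows `arguments` and `precondition`): `m` is the record of a
mode `mode < mode_count`; W2 for `(left_start, left_end, right_start, right_end)` with `n = blocksize[m->blockflag]` (`left_end`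
is never read: existentially quantified); `mem32[p_left] = left_start` (DECISIONS D-14); `len` and `p_left` point to two
different `int`s, each a live object of a caller's stack frame, ABOVE THE TWO STACK ARGUMENTS.

`len_above`, `left_above` (freeze-7, farm report CONTRACT-PRE of the unit vorbis_decode_packet_rest.9): with `R` the entry rsp, the
stack arguments `right_end` and `p_left` are the 16 bytes `[R + 8, R + 24)`, read IN PLACE until the end of the function (the steady
`[rsp + 0xbc0]`, `[rsp + 0xbc8]`). `StackObj` alone puts the two `int`s at or above `R + 8` (`LiveIn.above` with `ShadowPre`) and
below 800000H: it allows `p_left = R + 8` — then the store `*p_left = left_start` of segment .13 overwrites `right_end`, and the store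
`*len = 0` of segment .14 likewise for `len = R + 8` (`right_end` is read again at 0x111c0d) — and it allows `R + 16 = 800000H`: then
the argument `p_left` lies in arena memory and decode_residue's stores to a channel buffer overwrite it. The two clauses exclude
all of it; `Args.args_top` derives `R + 24 ≤ 800000H`. The only caller has them by `omega`: vorbis_decode_packet pushes the two
arguments below its own frame, and `len`, `p_left` are ITS arguments, objects of ITS callers' frames (Vorbis/Spec/PacketRestArgsTest.lean). -/
structure Args (others : List Obj) (frames : List (Nat × FrameLayout)) (mode : Nat) (u : State) : Prop where
  mode_lt : (mode : Int) < stb_vorbis.mode_count u.mem (fOf u)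
  m_eq : mOf u = stb_vorbis.mode_config_at (fOf u) mode
  w2 : ∃ le : Int, W2 (stb_vorbis.blocksize_0 u.mem (fOf u)) (stb_vorbis.blocksize_1 u.mem (fOf u))
    (nIntOf u.mem (fOf u) (mOf u)) (lsOf u) le (rsOf u) (reOf u)
  left_val : u.mem.i32 (pLeftOf u) = lsOf u
  len_obj : StackObj others frames (lenOf u) 4
  left_obj : StackObj others frames (pLeftOf u) 4
  apart : lenOf u + 4 ≤ pLeftOf u ∨ pLeftOf u + 4 ≤ lenOf u
  /-- the `int` at `len` lies above the two stack arguments `[entry rsp + 8, entry rsp + 24)` -/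
  len_above : (u.reg .rsp).toNat + 24 ≤ lenOf u
  /-- the `int` at `p_left` lies above the two stack arguments `[entry rsp + 8, entry rsp + 24)` -/
  left_above : (u.reg .rsp).toNat + 24 ≤ pLeftOf u

/-- **The two stack arguments lie inside the stack region**: `[entry rsp + 8, entry rsp + 24)` ends at or below 800000H (the `int`
at `p_left` lies above them and inside the region). What the read of `Stable.arg_left` needs through a callee's footprint whose
spans are only known to be "below the callee's rsp, or off the stack region" (decode_residue, inverse_mdct: the arena's gap). -/
theorem Args.args_top {others : List Obj} {frames : List (Nat × FrameLayout)} {mode : Nat} {u : State}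
    (h : Args others frames mode u) : (u.reg .rsp).toNat + 24 ≤ 0x800000 := by
  have h1 := h.left_above
  have h2 := h.left_obj.2.2
  omega

/-! ### The footprint -/

/-- The seven decode-time holes of `*f` (`InHole`, Vorbis/Invariant/Stores.lean), as spans. The function and its callees store
to: `stream`, `eof`, `error`, `temp_offset` (restored), `current_loc`, `current_loc_valid`, and the paging, bit-reader and window
fields `[1480, 1808)` (`first_decode`, `acc`, `valid_bits`, `discard_samples_deferred` …). Every window of the bit reader's
footprint (`Reader.winsBits`), of decode_residue's and of `error.spec`'s lies inside one of them. -/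
def holes (f : Nat) : List Span :=
  [⟨f + 48, f + 56⟩, ⟨f + 80, f + 112⟩, ⟨f + 132, f + 144⟩, ⟨f + 1000, f + 1128⟩, ⟨f + 1256, f + 1260⟩,
    ⟨f + 1392, f + 1400⟩, ⟨f + 1480, f + 1808⟩]

/-- Every hole span is `InHole`. -/
theorem holes_inHole (f : Nat) (s : Span) (h : s ∈ holes f) : InHole f s := by
  simp only [holes, List.mem_cons, List.mem_nil_iff, or_false] at h
  unfold InHole
  rcases h with rfl | rfl | rfl | rfl | rfl | rfl | rfl <;> simp only [] <;> omega

/-- **What vorbis_decode_packet_rest (with its callees) may write outside its own stack area** (CONTRACTS 62, row `footprint`),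
in the form `ConfigOK.frame_stores` consumes — every span is a hole of `*f`, a whole sample buffer, or off every allocated block:
* the decode-time holes of `*f`;
* the blocks at `finalY[c]` (`ysz c` bytes) and `channel_buffers[c]` (`4·b1` bytes), `c < channels`: contents of sample buffers;
* the free gap of the arena `[B + S, B + L)`: the temp blocks of decode_residue and inverse_mdct (released again);
* the dwords at `len` and `p_left` (stack objects of the callers);
* shadow bytes (`Asan.shadowSpan`): those of the stack area `[rsp − 3856, rsp)` (this function's protected frame, decode_residue's)
  and those of the arena's free gap (poisoned again when the temp block is released). -/
def writes (Ar : Arena) (ysz : Nat → Nat) (u : State) : List Span :=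
  holes (fOf u) ++
  (List.range (nchan u.mem (fOf u))).map
    (fun c => (⟨stb_vorbis.finalY u.mem (fOf u) c, stb_vorbis.finalY u.mem (fOf u) c + ysz c⟩ : Span)) ++
  (List.range (nchan u.mem (fOf u))).map
    (fun c => (⟨stb_vorbis.channel_buffers u.mem (fOf u) c,
      stb_vorbis.channel_buffers u.mem (fOf u) c + 4 * bsize u.mem (fOf u) 1⟩ : Span)) ++
  [⟨Ar.B + Ar.S, Ar.B + Ar.L⟩,
   ⟨lenOf u, lenOf u + 4⟩,
   ⟨pLeftOf u, pLeftOf u + 4⟩,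
   shadowSpan ((u.reg .rsp).toNat - 3856) (u.reg .rsp).toNat,
   shadowSpan (Ar.B + Ar.S) (Ar.B + Ar.L)]

end vorbis_decode_packet_rest

open vorbis_decode_packet_rest in
/-- **`vorbis_decode_packet_rest(rdi = f, rsi = len : int*, rdx = m : Mode*, ecx = left_start, r8d = left_end (never read),
r9d = right_start, [rsp+8] = right_end, [rsp+16] = p_left : int*)`** (CONTRACTS 62; stb_vorbis_fixed.c 3208–3474). A PROTECTED
frame (`Vorbis.Frames.vorbis_decode_packet_rest`: `residue_buffers`, `do_not_decode` (= `step2_flag`'s slot), `zero_channel`,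
`really_zero_channel`).

GHOSTS: `others`, `frames` (the shadow layer), `len` (the input's length), `Ar` (the arena), `stored`, `room` (decode_all's
counters), `mode` (the index of `m`), `ysz` (the sizes of the `finalY` blocks).

PRE: the shadow layer (`ShadowPre`: SH4 — the stack below is clean —, no object in the text); the decode-time invariant `DecodeInv`
(`VorbisOK f` ∧ ADO ∧ `Bits f` ∧ W1 as the point FB, SEP, the arena ghost facts, SH5 / SH7 for `range_list`, `log2_4`,
`inverse_db_table`); `Args` (the mode, W2, `mem32[p_left] = left_start`, `len` / `p_left` stack objects of the callers).

POST (CONTRACTS: "eax = 1 (every path through flush_packet)"; the only `return 0`, segment .16, is UNREACHABLE under MP5 ∧ MP6 ∧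
FL3, which are part of the pre: the post says rax = 1): the shadow layer for the SAME objects and frames (the protected frame is
unpoisoned, the temp blocks are released); `DecodeInv` again (`Bits`, W1, ADO idle restated); with `len' = mem32[len]`,
`left' = mem32[p_left]`: W3 for `(left', right_start, len', right_end)` and `left_start ≤ left'`; `first_decode = 0`;
`bytes_in_seg = 0` (flush_packet's post: the tail stores to none of `bytes_in_seg` / `last_seg` / `next_seg`).
`channel_buffers[c][0 .. n)` are opaque floats, the contents of `finalY[c]` arbitrary.

Stack: six pushes, `sub rsp, 0xb88` (3000 bytes), the return address of the call of decode_residue and its 848 bytes: 3856. -/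
def vorbis_decode_packet_rest.spec (others : List Obj) (frames : List (Nat × FrameLayout)) (len : Nat) (Ar : Arena)
    (stored room : Int) (mode : Nat) (ysz : Nat → Nat) : Spec where
  pre u :=
    ShadowPre others frames u ∧
    DecodeInv others frames len Ar stored room ysz u.mem (fOf u) ∧
    Args others frames mode u
  post u v :=
    v.reg .rax = 1 ∧
    ShadowInv others frames (v.reg .rsp).toNat v.mem ∧
    DecodeInv others frames len Ar stored room ysz v.mem (fOf u) ∧
    W3 (stb_vorbis.blocksize_1 v.mem (fOf u)) (nIntOf v.mem (fOf u) (mOf u)) (v.mem.i32 (pLeftOf u)) (rsOf u)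
      (v.mem.i32 (lenOf u)) (reOf u) ∧
    lsOf u ≤ v.mem.i32 (pLeftOf u) ∧
    stb_vorbis.first_decode v.mem (fOf u) = 0 ∧
    stb_vorbis.bytes_in_seg v.mem (fOf u) = 0
  frame := 3856
  writes u := vorbis_decode_packet_rest.writes Ar ysz u

@[vspec] theorem vorbis_decode_packet_rest.spec_frame (others : List Obj) (frames : List (Nat × FrameLayout)) (len : Nat)
    (Ar : Arena) (stored room : Int) (mode : Nat) (ysz : Nat → Nat) :
    (vorbis_decode_packet_rest.spec others frames len Ar stored room mode ysz).frame = 3856 := id rfl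

@[vspec] theorem vorbis_decode_packet_rest.spec_writes (others : List Obj) (frames : List (Nat × FrameLayout)) (len : Nat)
    (Ar : Arena) (stored room : Int) (mode : Nat) (ysz : Nat → Nat) (u : State) :
    (vorbis_decode_packet_rest.spec others frames len Ar stored room mode ysz).writes u =
      vorbis_decode_packet_rest.writes Ar ysz u := id rfl

/-! ## PART 3: the assertions at the entries of vorbis_decode_packet_rest's 16 segments

Every assertion is about the state `v` at the segment's entry address, RELATIVE TO THE FUNCTION'S ENTRY STATE `u` (and its return
address `ret`): the stack pointer is `u.rsp − 3000` (the STEADY rsp of CONTRACTS: six pushes and `sub rsp, 0xb88`), a spill slot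
`[rsp + off]` is `slot64 u v off` / `slot32 u v off`. `Stable` is CONTRACTS' STABLE (what holds at every cut 0x1112d4 …
0x111a39); `At2 … At16` add, per segment, which registers and slots hold which values. Loop counters that cross a segment
boundary are GHOST INDICES of the assertion (`At2 … i`: channel `i`; `At3 … i j`: partition `j`), so that segment `k`'s exit
assertion IS the successor's entry assertion with the counter advanced, and the composition unit has its measures
(`channels − i ≤ 16`, `partitions − j ≤ 31`).

NOT in the assertions (deviation from CONTRACTS' segment list, which carries them): ZC(i) / RZ, "the `zero_channel` entries
written so far are 0 or 1". No check site and no callee's precondition needs them: every use of these `int`s is a test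
against zero; RB(ch) of segment .9 is established inside that segment. -/

namespace vorbis_decode_packet_rest

/-- The active protected frames inside the function: its own frame, at `base = entry rsp − 2872`, in front of the callers'. -/
def framesIn (frames : List (Nat × FrameLayout)) (u : State) : List (Nat × FrameLayout) :=
  ((u.reg .rsp).toNat - 2872, Vorbis.Frames.vorbis_decode_packet_rest) :: frames

/-- The steady stack pointer: `entry rsp − 0xbb8`. -/
abbrev spOf (u : State) : Word := u.reg .rsp - 3000

/-- `SB`, the shadow address offset of the protected frame: `(steady rsp + 0x80) >> 3`. -/
def sbOf (u : State) : Nat := ((u.reg .rsp).toNat - 2872) / 8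

/-- The qword spill slot `[steady rsp + off]` of the function entered at `u`, read in the state `v`. -/
abbrev slot64 (u v : State) (off : Word) : Nat := v.mem.readLE (spOf u + off) 8

/-- The dword spill slot `[steady rsp + off]`. -/
abbrev slot32 (u v : State) (off : Word) : Nat := v.mem.readLE (spOf u + off) 4

/-- The frame object `residue_buffers[16]` (`float*`, 128 bytes at `steady rsp + 0xa0`). -/
def residueBuffersAt (u : State) : Nat := (u.reg .rsp).toNat - 3000 + 0xa0

/-- The frame object `do_not_decode[256]`, which is also `step2_flag[256]` (ONE object: 256 bytes at `steady rsp + 0x140`). -/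
def step2FlagAt (u : State) : Nat := (u.reg .rsp).toNat - 3000 + 0x140

/-- The frame object `zero_channel[256]` (`int`, 1024 bytes at `steady rsp + 0x280`). -/
def zeroChannelAt (u : State) : Nat := (u.reg .rsp).toNat - 3000 + 0x280

/-- The frame object `really_zero_channel[256]` (`int`, 1024 bytes at `steady rsp + 0x700`). -/
def reallyZeroChannelAt (u : State) : Nat := (u.reg .rsp).toNat - 3000 + 0x700

/-- **The machine frame and the invariant at a cut point** (the part of STABLE that also holds at the entry of the epilogue,
segment .15):
* `entry`: the function WAS entered at `u` by a call that returns to `ret` (alignment, stack room, `ret < 40000000H`), and `pre`: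
  its precondition held there — the source of every constant (W2, the mode, the arena ghost facts);
* the steady rsp; the text unchanged; DF = 0 and the MXCSR masks; the return address and the six saved registers in their slots;
* `same`: so far only the function's footprint has been written (what `Returned.same` needs at the `ret`);
* the shadow layer with the function's own protected frame poisoned (FramePoisoned at `base = rsp + 0x80`; the four frame objects
  are live: `ShadowInv.live_frame`), the clean stack ending at the steady rsp;
* the decode-time invariant `DecodeInv` of the current memory (FB: `VorbisOK f`, ADO idle, `Bits f`, W1; SEP; SH5 / SH7). -/
structure Frame (u₀ : State) (others : List Obj) (frames : List (Nat × FrameLayout)) (len : Nat) (Ar : Arena)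
    (stored room : Int) (mode : Nat) (ysz : Nat → Nat) (u : State) (ret : Word)
    (v : State) : Prop where
  entry : AtEntry (Vorbis.conv u₀) Vorbis.L.vorbis_decode_packet_rest.entry 3856 ret u
  pre : (vorbis_decode_packet_rest.spec others frames len Ar stored room mode ysz).pre u
  rsp : v.reg .rsp = spOf u
  code : Vorbis.CodeOK u₀ v.mem
  abi : abiInv v
  same : Mem.SameExcept ((vorbis_decode_packet_rest.spec others frames len Ar stored room mode ysz).footprint u) u.mem v.mem
  ra : UInt64.ofNat (v.mem.readLE (u.reg .rsp) 8) = ret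
  s_r15 : UInt64.ofNat (v.mem.readLE (u.reg .rsp - 8) 8) = u.reg .r15
  s_r14 : UInt64.ofNat (v.mem.readLE (u.reg .rsp - 16) 8) = u.reg .r14
  s_r13 : UInt64.ofNat (v.mem.readLE (u.reg .rsp - 24) 8) = u.reg .r13
  s_r12 : UInt64.ofNat (v.mem.readLE (u.reg .rsp - 32) 8) = u.reg .r12
  s_rbp : UInt64.ofNat (v.mem.readLE (u.reg .rsp - 40) 8) = u.reg .rbp
  s_rbx : UInt64.ofNat (v.mem.readLE (u.reg .rsp - 48) 8) = u.reg .rbx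
  shadow : ShadowInv others (framesIn frames u) (spOf u).toNat v.mem
  inv : DecodeInv others (framesIn frames u) len Ar stored room ysz v.mem (fOf u)

/-- **STABLE** (CONTRACTS 62, row `cut points`): what holds at every segment boundary between the prologue and the epilogue:
`Frame`, and the spill slots `[0x40] = f`, `[0x68] = len`, `[0x70] = m`, `[0x78] = ls`, `[0x7c] = right_start`, `[0x50] = n =
blocksize[m->blockflag]`, `[0x3c] = n >> 1`, `[0x60] = SB`; the two stack arguments in place: `right_end` at `[entry rsp + 8]`,
`p_left` at `[entry rsp + 16]`; `mem32[p_left] = ls`. `ls` is the value of the slot `[rsp + 0x78]` and of `mem32[p_left]`: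
`left_start` up to segment .13, `left'` afterwards. -/
structure Stable (u₀ : State) (others : List Obj) (frames : List (Nat × FrameLayout)) (len : Nat) (Ar : Arena)
    (stored room : Int) (mode : Nat) (ysz : Nat → Nat) (u : State) (ret : Word)
    (ls : Int) (v : State) : Prop
    extends Frame u₀ others frames len Ar stored room mode ysz u ret v where
  slot_f : slot64 u v 0x40 = fOf u
  slot_len : slot64 u v 0x68 = lenOf u
  slot_m : slot64 u v 0x70 = mOf u
  slot_ls : sint32 (slot32 u v 0x78) = ls
  slot_rs : sint32 (slot32 u v 0x7c) = rsOf u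
  slot_n : slot32 u v 0x50 = nOf v.mem (fOf u) (mOf u)
  slot_n2 : slot32 u v 0x3c = nOf v.mem (fOf u) (mOf u) / 2
  slot_sb : slot64 u v 0x60 = sbOf u
  arg_re : sint32 (v.mem.readLE (u.reg .rsp + 8) 4) = reOf u
  arg_left : v.mem.readLE (u.reg .rsp + 16) 8 = pLeftOf u
  left_val : v.mem.i32 (pLeftOf u) = ls

/-- **Entry of segment .2, 0x1112d4: the head of the channel loop** (line 3225), ghost `i`: STABLE ∧ `r14d = i`, `0 ≤ i ≤ C` ∧ `r13 = map`. All other registers and scratch slots are dead. -/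
structure At2 (u₀ : State) (others : List Obj) (frames : List (Nat × FrameLayout)) (len : Nat) (Ar : Arena)
    (stored room : Int) (mode : Nat) (ysz : Nat → Nat) (u : State) (ret : Word)
    (i : Nat) (v : State) : Prop
    extends Stable u₀ others frames len Ar stored room mode ysz u ret (lsOf u) v where
  rip : v.rip = Vorbis.L.vorbis_decode_packet_rest.cut16
  r14 : v.reg .r14 = UInt64.ofNat i
  i_le : (i : Int) ≤ stb_vorbis.channels v.mem (fOf u)
  r13 : (v.reg .r13).toNat = mapOf v.mem (fOf u) (mOf u)

/-- **Entry of segment .3, 0x110e7e: the head of the partition loop** (line 3242) of channel `i`, ghost `j`: STABLE ∧ `r15 = g` (a floor of `f`: the Floor1 of channel `i`) ∧ `rbp = f` ∧ `[0x48] = j ≤ partitions` ∧ `[0x8] = offset = 2 + Σ_{j' < j} cdim[pcl[j']]` ∧ `[0x20] = finalY = f->finalY[i]` ∧ `[0x54] = i < C` ∧ `[0x58] = map`. (`[0x4c] = range`: a value only, not constrained.) -/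
structure At3 (u₀ : State) (others : List Obj) (frames : List (Nat × FrameLayout)) (len : Nat) (Ar : Arena)
    (stored room : Int) (mode : Nat) (ysz : Nat → Nat) (u : State) (ret : Word)
    (i j : Nat) (v : State) : Prop
    extends Stable u₀ others frames len Ar stored room mode ysz u ret (lsOf u) v where
  rip : v.rip = Vorbis.L.vorbis_decode_packet_rest.cut8
  g : IsFloor v.mem (fOf u) (v.reg .r15).toNat
  rbp : (v.reg .rbp).toNat = (fOf u)
  slot_j : slot32 u v 0x48 = j
  j_le : j ≤ Floor1.partitions v.mem (v.reg .r15).toNat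
  slot_offset : slot32 u v 0x8 = 2 + Floor1.dimSum v.mem (v.reg .r15).toNat j
  slot_i : slot32 u v 0x54 = i
  i_lt : (i : Int) < stb_vorbis.channels v.mem (fOf u)
  slot_finalY : slot64 u v 0x20 = stb_vorbis.finalY v.mem (fOf u) i
  slot_map : slot64 u v 0x58 = mapOf v.mem (fOf u) (mOf u)

/-- **Entry of segment .4, 0x110d0a: the head of the `k` loop** (line 3252) of channel `i`, partition `j`, entered with `k = 0`: STABLE ∧ `rbp = f` ∧ `r14d = k = 0` ∧ `[0x18] = g` ∧ `[0x48] = j < partitions` ∧ `[0x38] = pclass = pcl[j]` ∧ `[0x10] = cdim = class_dimensions[pclass]` ∧ `[0x2c] = cbits = class_subclasses[pclass]` ∧ `[0x30] = csub = 2^cbits − 1` ∧ `[0x8] = offset = 2 + Σ_{j' < j} cdim[pcl[j']]` ∧ `[0x20]`, `[0x54]`, `[0x58]` as in .3. `[rsp] = cval`: any `int`. (The loop's own invariant — `0 ≤ k ≤ cdim`, `offset + k` — is the worker's: the back edge 0x110d06 is inside the segment.) -/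
structure At4 (u₀ : State) (others : List Obj) (frames : List (Nat × FrameLayout)) (len : Nat) (Ar : Arena)
    (stored room : Int) (mode : Nat) (ysz : Nat → Nat) (u : State) (ret : Word)
    (i j : Nat) (v : State) : Prop
    extends Stable u₀ others frames len Ar stored room mode ysz u ret (lsOf u) v where
  rip : v.rip = Vorbis.L.vorbis_decode_packet_rest.cut7
  rbp : (v.reg .rbp).toNat = (fOf u)
  r14 : v.reg .r14 = 0
  g : IsFloor v.mem (fOf u) (slot64 u v 0x18)
  slot_j : slot32 u v 0x48 = j
  j_lt : j < Floor1.partitions v.mem (slot64 u v 0x18)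
  slot_pclass : slot32 u v 0x38 = Floor1.partition_class_list v.mem (slot64 u v 0x18) j
  slot_cdim : slot32 u v 0x10 = Floor1.class_dimensions v.mem (slot64 u v 0x18) (slot32 u v 0x38)
  slot_cbits : slot32 u v 0x2c = Floor1.class_subclasses v.mem (slot64 u v 0x18) (slot32 u v 0x38)
  slot_csub : slot32 u v 0x30 = 2 ^ slot32 u v 0x2c - 1
  slot_offset : slot32 u v 0x8 = 2 + Floor1.dimSum v.mem (slot64 u v 0x18) j
  slot_i : slot32 u v 0x54 = i
  i_lt : (i : Int) < stb_vorbis.channels v.mem (fOf u)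
  slot_finalY : slot64 u v 0x20 = stb_vorbis.finalY v.mem (fOf u) i
  slot_map : slot64 u v 0x58 = mapOf v.mem (fOf u) (mOf u)

/-- **Entry of segment .5, 0x111000: after the partition loop of channel `i`** (line 3264: the EOP test, then the neighbors / predict_point loop): STABLE ∧ `r15 = g` ∧ `[0x20] = finalY = f->finalY[i]` ∧ `[0x54] = i < C` ∧ `[0x58] = map`. -/
structure At5 (u₀ : State) (others : List Obj) (frames : List (Nat × FrameLayout)) (len : Nat) (Ar : Arena)
    (stored room : Int) (mode : Nat) (ysz : Nat → Nat) (u : State) (ret : Word)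
    (i : Nat) (v : State) : Prop
    extends Stable u₀ others frames len Ar stored room mode ysz u ret (lsOf u) v where
  rip : v.rip = Vorbis.L.vorbis_decode_packet_rest.cut9
  g : IsFloor v.mem (fOf u) (v.reg .r15).toNat
  slot_i : slot32 u v 0x54 = i
  i_lt : (i : Int) < stb_vorbis.channels v.mem (fOf u)
  slot_finalY : slot64 u v 0x20 = stb_vorbis.finalY v.mem (fOf u) i
  slot_map : slot64 u v 0x58 = mapOf v.mem (fOf u) (mOf u)

/-- **Entry of segment .6, 0x111265: `finalY[j] = −1` where `step2_flag[j] = 0`** (line 3302), channel `i`: STABLE ∧ `r15 = g` ∧ `[0x20] = finalY` ∧ `[0x38] = i < C` ∧ `[0x30] = map`. (The load of `g->values` at the loop head 0x11127e has NO check call: the access needs only that the floor element is in the layout, `FloorShape.elem_inside`.) -/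
structure At6 (u₀ : State) (others : List Obj) (frames : List (Nat × FrameLayout)) (len : Nat) (Ar : Arena)
    (stored room : Int) (mode : Nat) (ysz : Nat → Nat) (u : State) (ret : Word)
    (i : Nat) (v : State) : Prop
    extends Stable u₀ others frames len Ar stored room mode ysz u ret (lsOf u) v where
  rip : v.rip = Vorbis.L.vorbis_decode_packet_rest.cut12
  g : IsFloor v.mem (fOf u) (v.reg .r15).toNat
  slot_i : slot32 u v 0x38 = i
  i_lt : (i : Int) < stb_vorbis.channels v.mem (fOf u)
  slot_finalY : slot64 u v 0x20 = stb_vorbis.finalY v.mem (fOf u) i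
  slot_map : slot64 u v 0x30 = mapOf v.mem (fOf u) (mOf u)

/-- **Entry A of segment .7, 0x1112b5** (the `error:` label, from .2 and .5: `zero_channel[i] = TRUE`, then `++i`): STABLE ∧ `r14d = i`, `i < C` ∧ `r13 = map`. -/
structure At7a (u₀ : State) (others : List Obj) (frames : List (Nat × FrameLayout)) (len : Nat) (Ar : Arena)
    (stored room : Int) (mode : Nat) (ysz : Nat → Nat) (u : State) (ret : Word)
    (i : Nat) (v : State) : Prop
    extends Stable u₀ others frames len Ar stored room mode ysz u ret (lsOf u) v where
  rip : v.rip = Vorbis.L.vorbis_decode_packet_rest.cut14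
  r14 : v.reg .r14 = UInt64.ofNat i
  i_lt : (i : Int) < stb_vorbis.channels v.mem (fOf u)
  r13 : (v.reg .r13).toNat = mapOf v.mem (fOf u) (mOf u)

/-- **Entry B of segment .7, 0x1112d0** (from .6: `++i` only): STABLE ∧ `r14d = i`, `i < C` ∧ `r13 = map`. -/
structure At7b (u₀ : State) (others : List Obj) (frames : List (Nat × FrameLayout)) (len : Nat) (Ar : Arena)
    (stored room : Int) (mode : Nat) (ysz : Nat → Nat) (u : State) (ret : Word)
    (i : Nat) (v : State) : Prop
    extends Stable u₀ others frames len Ar stored room mode ysz u ret (lsOf u) v where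
  rip : v.rip = Vorbis.L.vorbis_decode_packet_rest.cut15
  r14 : v.reg .r14 = UInt64.ofNat i
  i_lt : (i : Int) < stb_vorbis.channels v.mem (fOf u)
  r13 : (v.reg .r13).toNat = mapOf v.mem (fOf u) (mOf u)

/-- **Entry of segment .8, 0x111457: AFTER THE FLOOR LOOP** (line 3323: the memcpy of `zero_channel`, the coupling flags): STABLE ∧ `eax = C = f->channels` (zero-extended: the `cdqe` that follows) ∧ `r13 = map`. FY1: all `finalY` blocks allocated, contents arbitrary. -/
structure At8 (u₀ : State) (others : List Obj) (frames : List (Nat × FrameLayout)) (len : Nat) (Ar : Arena)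
    (stored room : Int) (mode : Nat) (ysz : Nat → Nat) (u : State) (ret : Word)
    (v : State) : Prop
    extends Stable u₀ others frames len Ar stored room mode ysz u ret (lsOf u) v where
  rip : v.rip = Vorbis.L.vorbis_decode_packet_rest.cut22
  rax : v.reg .rax = UInt64.ofNat (nchan v.mem (fOf u))
  r13 : (v.reg .r13).toNat = mapOf v.mem (fOf u) (mOf u)

/-- **Entry of segment .9, 0x111559: the residue loop** (line 3331): STABLE ∧ `r15 = map` ∧ `r13 = SB`. -/
structure At9 (u₀ : State) (others : List Obj) (frames : List (Nat × FrameLayout)) (len : Nat) (Ar : Arena)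
    (stored room : Int) (mode : Nat) (ysz : Nat → Nat) (u : State) (ret : Word)
    (v : State) : Prop
    extends Stable u₀ others frames len Ar stored room mode ysz u ret (lsOf u) v where
  rip : v.rip = Vorbis.L.vorbis_decode_packet_rest.cut25
  r15 : (v.reg .r15).toNat = mapOf v.mem (fOf u) (mOf u)
  r13 : (v.reg .r13).toNat = sbOf u

/-- **Entry of segment .10, 0x1116af: inverse coupling** (line 3357): STABLE ∧ `r15 = map` ∧ `r12 = f` ∧ `[0x8] = SB`. -/
structure At10 (u₀ : State) (others : List Obj) (frames : List (Nat × FrameLayout)) (len : Nat) (Ar : Arena)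
    (stored room : Int) (mode : Nat) (ysz : Nat → Nat) (u : State) (ret : Word)
    (v : State) : Prop
    extends Stable u₀ others frames len Ar stored room mode ysz u ret (lsOf u) v where
  rip : v.rip = Vorbis.L.vorbis_decode_packet_rest.cut29
  r15 : (v.reg .r15).toNat = mapOf v.mem (fOf u) (mOf u)
  r12 : (v.reg .r12).toNat = (fOf u)
  slot_sb8 : slot64 u v 0x8 = sbOf u

/-- **Entry of segment .11, 0x11181f: the deferred floors** (line 3381: memset or do_floor per channel): STABLE ∧ `r15 = map` ∧ `[0x20] = SB`. -/
structure At11 (u₀ : State) (others : List Obj) (frames : List (Nat × FrameLayout)) (len : Nat) (Ar : Arena)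
    (stored room : Int) (mode : Nat) (ysz : Nat → Nat) (u : State) (ret : Word)
    (v : State) : Prop
    extends Stable u₀ others frames len Ar stored room mode ysz u ret (lsOf u) v where
  rip : v.rip = Vorbis.L.vorbis_decode_packet_rest.cut32
  r15 : (v.reg .r15).toNat = mapOf v.mem (fOf u) (mOf u)
  slot_sb20 : slot64 u v 0x20 = sbOf u

/-- **Entry of segment .12, 0x1118de: the inverse MDCT per channel** (line 3401): STABLE ∧ `[0x0] = SB`. -/
structure At12 (u₀ : State) (others : List Obj) (frames : List (Nat × FrameLayout)) (len : Nat) (Ar : Arena)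
    (stored room : Int) (mode : Nat) (ysz : Nat → Nat) (u : State) (ret : Word)
    (v : State) : Prop
    extends Stable u₀ others frames len Ar stored room mode ysz u ret (lsOf u) v where
  rip : v.rip = Vorbis.L.vorbis_decode_packet_rest.cut36
  slot_sb0 : slot64 u v 0x0 = sbOf u

/-- **Entry of segment .13, 0x111939: flush_packet, the `first_decode` arm, the discard arm** (lines 3407–3428; the only writer of `*p_left` and of `[0x78]`): STABLE ∧ `[0x0] = SB`. (W1 is in `DecodeInv`; W2 for `([0x78], ·, [0x7c], [entry rsp + 8])` and `mem32[p_left] = left_start` are `Stable.pre`, `Stable.slot_ls`, `Stable.left_val`.) -/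
structure At13 (u₀ : State) (others : List Obj) (frames : List (Nat × FrameLayout)) (len : Nat) (Ar : Arena)
    (stored room : Int) (mode : Nat) (ysz : Nat → Nat) (u : State) (ret : Word)
    (v : State) : Prop
    extends Stable u₀ others frames len Ar stored room mode ysz u ret (lsOf u) v where
  rip : v.rip = Vorbis.L.vorbis_decode_packet_rest.cut39
  slot_sb0 : slot64 u v 0x0 = sbOf u

/-- Segment .14's entry assertion for a given `left'` (see `At14`). -/
structure At14Core (u₀ : State) (others : List Obj) (frames : List (Nat × FrameLayout)) (len : Nat) (Ar : Arena)
    (stored room : Int) (mode : Nat) (ysz : Nat → Nat) (u : State) (ret : Word)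
    (left' : Int) (v : State) : Prop
    extends Stable u₀ others frames len Ar stored room mode ysz u ret left' v where
  rip : v.rip = Vorbis.L.vorbis_decode_packet_rest.cut41
  r13 : (v.reg .r13).toNat = sbOf u
  left_nonneg : 0 ≤ left'
  left_half : left' ≤ stb_vorbis.blocksize_1 v.mem (fOf u) / 2
  left_ge : lsOf u ≤ left'
  left_le : left' ≤ rsOf u
  first : stb_vorbis.first_decode v.mem (fOf u) = 0
  drained : stb_vorbis.bytes_in_seg v.mem (fOf u) = 0

/-- **Entry of segment .14, 0x1119bc: `current_loc` bookkeeping and `*len`** (lines 3440–3473): STABLE except that `[0x78]` and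
`mem32[p_left]` hold `left'` ∧ `r13 = SB` ∧ `0 ≤ left' ≤ b1/2` ∧ `left_start ≤ left' ≤ right_start` ∧ `first_decode = 0` ∧ `bytes_in_seg = 0` (flush_packet's post). (W1 is in
`DecodeInv`; `right_start ≤ right_end ≤ n`, `right_end − right_start ≤ b1/2` are W2: `W2.bounds` on `Frame.pre`.) -/
def At14 (u₀ : State) (others : List Obj) (frames : List (Nat × FrameLayout)) (len : Nat) (Ar : Arena)
    (stored room : Int) (mode : Nat) (ysz : Nat → Nat) (u : State) (ret : Word)
    (v : State) : Prop :=
  ∃ left' : Int, At14Core u₀ others frames len Ar stored room mode ysz u ret left' v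

/-- **Entry of segment .15, 0x111a3e: the common epilogue** (unpoison the frame, restore, `ret`): `Frame` (steady rsp, the saved
registers and the return address in their slots, FramePoisoned: the shadow layer still has the function's frame) ∧ `r13 = SB` ∧
`eax = 1` ∧ the function's post for the current memory EXCEPT the frame clause: `DecodeInv` (still for the frames with the function's
own), W3 for `(mem32[p_left], right_start, mem32[len], right_end)`, `left_start ≤ mem32[p_left]`, `first_decode = 0`, `bytes_in_seg = 0`. -/
structure At15 (u₀ : State) (others : List Obj) (frames : List (Nat × FrameLayout)) (len : Nat) (Ar : Arena)
    (stored room : Int) (mode : Nat) (ysz : Nat → Nat) (u : State) (ret : Word)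
    (v : State) : Prop
    extends Frame u₀ others frames len Ar stored room mode ysz u ret v where
  rip : v.rip = Vorbis.L.vorbis_decode_packet_rest.cut42
  r13 : (v.reg .r13).toNat = sbOf u
  rax : v.reg .rax = 1
  w3 : W3 (stb_vorbis.blocksize_1 v.mem (fOf u)) (nIntOf v.mem (fOf u) (mOf u)) (v.mem.i32 (pLeftOf u)) (rsOf u)
    (v.mem.i32 (lenOf u)) (reOf u)
  left_ge : lsOf u ≤ v.mem.i32 (pLeftOf u)
  first : stb_vorbis.first_decode v.mem (fOf u) = 0
  drained : stb_vorbis.bytes_in_seg v.mem (fOf u) = 0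

/-- **Entry of segment .16, 0x110c44: `return error(f, VORBIS_invalid_stream)` for a floor of type 0** (line 3230) — DEAD after setup: STABLE ∧ the reason it was reached, `f->floor_types[floor] = 0` for a `floor < floor_count` (MP5, MP6), which contradicts FL3 (`FloorsOK.type_ne_zero`). The unit is proved from the contradiction; the function's post therefore has no `eax = 0` case. -/
structure At16 (u₀ : State) (others : List Obj) (frames : List (Nat × FrameLayout)) (len : Nat) (Ar : Arena)
    (stored room : Int) (mode : Nat) (ysz : Nat → Nat) (u : State) (ret : Word)
    (v : State) : Prop
    extends Stable u₀ others frames len Ar stored room mode ysz u ret (lsOf u) v where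
  rip : v.rip = Vorbis.L.vorbis_decode_packet_rest.cut1
  dead : ∃ fl : Nat, (fl : Int) < stb_vorbis.floor_count v.mem (fOf u) ∧ stb_vorbis.floor_types v.mem (fOf u) fl = 0

end vorbis_decode_packet_rest

/-! ## PART 4: the statements of the 16 segments

`Seg<k> Lay μ u₀`: from every state that satisfies the entry assertion of segment `k` the machine reaches a state that satisfies one
of its exit assertions (= the entry assertion of a successor segment), and every state stepped from on the way is in `WayInv`. The
unit `vorbis_decode_packet_rest.<k>` proves `Seg<k>` under the contracts of the segment's callees; the composition unit chains them.
Measures of the composition: the channel loop (.2 → .3 → … → .7 → .2) by `channels − i` (`At2.i_le`; `channels ≤ 16`: HD1); the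
partition loop (.3 → .4 → .3) by `partitions − j` (`At3.j_le`; `partitions ≤ 31`: FL4). -/

namespace vorbis_decode_packet_rest

/-- **Segment .1, 0x110b00–0x110c3f** (lines 3208–3225): the prologue — six pushes, the spills, the frame header, the twelve poison
stores (`ShadowInv.prologue_ra` with `Vorbis.Frames.vorbis_decode_packet_rest`), `n`, `map`, `n2`, `i = 0` → .2. Its entry assertion is
the function's: entered by a call (`AtEntry`) with its precondition. -/
def Seg1 (Lay : Layout) (μ : Microarch) (u₀ : State) : Prop :=
  ∀ (others : List Obj) (frames : List (Nat × FrameLayout)) (len : Nat) (Ar : Arena) (stored room : Int)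
      (mode : Nat) (ysz : Nat → Nat) (u : State) (ret : Word),
    AtEntry (Vorbis.conv u₀) Vorbis.L.vorbis_decode_packet_rest.entry 3856 ret u →
    (vorbis_decode_packet_rest.spec others frames len Ar stored room mode ysz).pre u →
    ReachVia Lay μ Vorbis.WayInv u (fun w => At2 u₀ others frames len Ar stored room mode ysz u ret 0 w)

/-- **Segment .2, 0x1112d4–0x111452** (lines 3225–3242): the head of the channel loop. `i ≥ C` → .8; floor type 0 → .16 (dead: FL3); `get_bits(f, 1) = 0` → .7 entry A; otherwise `range`, `finalY[0..1]`, `offset = 2`, `j = 0` → .3. -/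
def Seg2 (Lay : Layout) (μ : Microarch) (u₀ : State) : Prop :=
  ∀ (others : List Obj) (frames : List (Nat × FrameLayout)) (len : Nat) (Ar : Arena) (stored room : Int)
      (mode : Nat) (ysz : Nat → Nat) (u : State) (ret : Word) (i : Nat) (v : State),
    (At2 u₀ others frames len Ar stored room mode ysz u ret i v) →
    ReachVia Lay μ Vorbis.WayInv v (fun w => At8 u₀ others frames len Ar stored room mode ysz u ret w ∨ At16 u₀ others frames len Ar stored room mode ysz u ret w ∨ At7a u₀ others frames len Ar stored room mode ysz u ret i w ∨ At3 u₀ others frames len Ar stored room mode ysz u ret i 0 w)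

/-- **Segment .3, 0x110e7e–0x110ffb + 0x110c5d–0x110c8d + 0x110e5b–0x110e6f** (lines 3242–3250): the head of the partition loop. `j ≥ partitions` → .5; otherwise `pclass`, `cdim`, `cbits`, `csub`, the inline DECODE #1 (masterbook) → `cval`, `k = 0` → .4. -/
def Seg3 (Lay : Layout) (μ : Microarch) (u₀ : State) : Prop :=
  ∀ (others : List Obj) (frames : List (Nat × FrameLayout)) (len : Nat) (Ar : Arena) (stored room : Int)
      (mode : Nat) (ysz : Nat → Nat) (u : State) (ret : Word) (i j : Nat) (v : State),
    (At3 u₀ others frames len Ar stored room mode ysz u ret i j v) →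
    ReachVia Lay μ Vorbis.WayInv v (fun w => At5 u₀ others frames len Ar stored room mode ysz u ret i w ∨ At4 u₀ others frames len Ar stored room mode ysz u ret i j w)

/-- **Segment .4, 0x110c92–0x110e56 + 0x110e74–0x110e79** (lines 3252–3261 and the latch of 3242): the whole `k` loop — `book = subclass_books[pclass][cval & csub]`, the inline DECODE #2, `finalY[offset++]` — then `++j` → .3. -/
def Seg4 (Lay : Layout) (μ : Microarch) (u₀ : State) : Prop :=
  ∀ (others : List Obj) (frames : List (Nat × FrameLayout)) (len : Nat) (Ar : Arena) (stored room : Int)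
      (mode : Nat) (ysz : Nat → Nat) (u : State) (ret : Word) (i j : Nat) (v : State),
    (At4 u₀ others frames len Ar stored room mode ysz u ret i j v) →
    ReachVia Lay μ Vorbis.WayInv v (fun w => At3 u₀ others frames len Ar stored room mode ysz u ret i (j + 1) w)

/-- **Segment .5, 0x111000–0x111260** (lines 3264–3294): `valid_bits = −1` → .7 entry A; otherwise `step2_flag[0..1] = 1` and the whole neighbors / predict_point loop → .6. -/
def Seg5 (Lay : Layout) (μ : Microarch) (u₀ : State) : Prop :=
  ∀ (others : List Obj) (frames : List (Nat × FrameLayout)) (len : Nat) (Ar : Arena) (stored room : Int)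
      (mode : Nat) (ysz : Nat → Nat) (u : State) (ret : Word) (i : Nat) (v : State),
    (At5 u₀ others frames len Ar stored room mode ysz u ret i v) →
    ReachVia Lay μ Vorbis.WayInv v (fun w => At7a u₀ others frames len Ar stored room mode ysz u ret i w ∨ At6 u₀ others frames len Ar stored room mode ysz u ret i w)

/-- **Segment .6, 0x111265–0x1112b3** (lines 3302–3304): `finalY[j] = −1` where `step2_flag[j] = 0` → .7 entry B. -/
def Seg6 (Lay : Layout) (μ : Microarch) (u₀ : State) : Prop :=
  ∀ (others : List Obj) (frames : List (Nat × FrameLayout)) (len : Nat) (Ar : Arena) (stored room : Int)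
      (mode : Nat) (ysz : Nat → Nat) (u : State) (ret : Word) (i : Nat) (v : State),
    (At6 u₀ others frames len Ar stored room mode ysz u ret i v) →
    ReachVia Lay μ Vorbis.WayInv v (fun w => At7b u₀ others frames len Ar stored room mode ysz u ret i w)

/-- **Segment .7, 0x1112b5–0x1112d0** (lines 3309, 3225), TWO entries: A `zero_channel[i] = TRUE`; both `++i` → .2. -/
def Seg7 (Lay : Layout) (μ : Microarch) (u₀ : State) : Prop :=
  ∀ (others : List Obj) (frames : List (Nat × FrameLayout)) (len : Nat) (Ar : Arena) (stored room : Int)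
      (mode : Nat) (ysz : Nat → Nat) (u : State) (ret : Word) (i : Nat) (v : State),
    (At7a u₀ others frames len Ar stored room mode ysz u ret i v ∨ At7b u₀ others frames len Ar stored room mode ysz u ret i v) →
    ReachVia Lay μ Vorbis.WayInv v (fun w => At2 u₀ others frames len Ar stored room mode ysz u ret (i + 1) w)

/-- **Segment .8, 0x111457–0x111554** (lines 3323–3326): `memcpy(really_zero_channel, zero_channel, 4·C)`, the coupling flags loop → .9. -/
def Seg8 (Lay : Layout) (μ : Microarch) (u₀ : State) : Prop :=
  ∀ (others : List Obj) (frames : List (Nat × FrameLayout)) (len : Nat) (Ar : Arena) (stored room : Int)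
      (mode : Nat) (ysz : Nat → Nat) (u : State) (ret : Word) (v : State),
    (At8 u₀ others frames len Ar stored room mode ysz u ret v) →
    ReachVia Lay μ Vorbis.WayInv v (fun w => At9 u₀ others frames len Ar stored room mode ysz u ret w)

/-- **Segment .9, 0x111559–0x1116aa** (lines 3331–3349): the residue loop — build `residue_buffers` / `do_not_decode`, call decode_residue → .10. -/
def Seg9 (Lay : Layout) (μ : Microarch) (u₀ : State) : Prop :=
  ∀ (others : List Obj) (frames : List (Nat × FrameLayout)) (len : Nat) (Ar : Arena) (stored room : Int)
      (mode : Nat) (ysz : Nat → Nat) (u : State) (ret : Word) (v : State),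
    (At9 u₀ others frames len Ar stored room mode ysz u ret v) →
    ReachVia Lay μ Vorbis.WayInv v (fun w => At10 u₀ others frames len Ar stored room mode ysz u ret w)

/-- **Segment .10, 0x1116af–0x11181a** (lines 3357–3374): inverse coupling → .11. -/
def Seg10 (Lay : Layout) (μ : Microarch) (u₀ : State) : Prop :=
  ∀ (others : List Obj) (frames : List (Nat × FrameLayout)) (len : Nat) (Ar : Arena) (stored room : Int)
      (mode : Nat) (ysz : Nat → Nat) (u : State) (ret : Word) (v : State),
    (At10 u₀ others frames len Ar stored room mode ysz u ret v) →
    ReachVia Lay μ Vorbis.WayInv v (fun w => At11 u₀ others frames len Ar stored room mode ysz u ret w)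

/-- **Segment .11, 0x11181f–0x1118dc** (lines 3381–3385): the deferred floors — memset or do_floor per channel → .12. -/
def Seg11 (Lay : Layout) (μ : Microarch) (u₀ : State) : Prop :=
  ∀ (others : List Obj) (frames : List (Nat × FrameLayout)) (len : Nat) (Ar : Arena) (stored room : Int)
      (mode : Nat) (ysz : Nat → Nat) (u : State) (ret : Word) (v : State),
    (At11 u₀ others frames len Ar stored room mode ysz u ret v) →
    ReachVia Lay μ Vorbis.WayInv v (fun w => At12 u₀ others frames len Ar stored room mode ysz u ret w)

/-- **Segment .12, 0x1118de–0x111937** (lines 3401–3402): inverse_mdct per channel → .13. -/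
def Seg12 (Lay : Layout) (μ : Microarch) (u₀ : State) : Prop :=
  ∀ (others : List Obj) (frames : List (Nat × FrameLayout)) (len : Nat) (Ar : Arena) (stored room : Int)
      (mode : Nat) (ysz : Nat → Nat) (u : State) (ret : Word) (v : State),
    (At12 u₀ others frames len Ar stored room mode ysz u ret v) →
    ReachVia Lay μ Vorbis.WayInv v (fun w => At13 u₀ others frames len Ar stored room mode ysz u ret w)

/-- **Segment .13, 0x111939–0x1119b4 + 0x111a9d–0x111b25** (lines 3407–3428): flush_packet; the `first_decode` arm; the discard arm → .14. -/
def Seg13 (Lay : Layout) (μ : Microarch) (u₀ : State) : Prop :=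
  ∀ (others : List Obj) (frames : List (Nat × FrameLayout)) (len : Nat) (Ar : Arena) (stored room : Int)
      (mode : Nat) (ysz : Nat → Nat) (u : State) (ret : Word) (v : State),
    (At13 u₀ others frames len Ar stored room mode ysz u ret v) →
    ReachVia Lay μ Vorbis.WayInv v (fun w => At14 u₀ others frames len Ar stored room mode ysz u ret w)

/-- **Segment .14, 0x1119bc–0x111a39 + 0x111b2a–0x111c4d** (lines 3440–3473): `current_loc` bookkeeping and `*len` → .15 with W3. -/
def Seg14 (Lay : Layout) (μ : Microarch) (u₀ : State) : Prop :=
  ∀ (others : List Obj) (frames : List (Nat × FrameLayout)) (len : Nat) (Ar : Arena) (stored room : Int)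
      (mode : Nat) (ysz : Nat → Nat) (u : State) (ret : Word) (v : State),
    (At14 u₀ others frames len Ar stored room mode ysz u ret v) →
    ReachVia Lay μ Vorbis.WayInv v (fun w => At15 u₀ others frames len Ar stored room mode ysz u ret w)

/-- **Segment .16, 0x110c44–0x110c58** (line 3230): `return error(f, VORBIS_invalid_stream)` — dead: `At16.dead` contradicts FL3. -/
def Seg16 (Lay : Layout) (μ : Microarch) (u₀ : State) : Prop :=
  ∀ (others : List Obj) (frames : List (Nat × FrameLayout)) (len : Nat) (Ar : Arena) (stored room : Int)
      (mode : Nat) (ysz : Nat → Nat) (u : State) (ret : Word) (v : State),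
    (At16 u₀ others frames len Ar stored room mode ysz u ret v) →
    ReachVia Lay μ Vorbis.WayInv v (fun w => At15 u₀ others frames len Ar stored room mode ysz u ret w)

/-- **Segment .15, 0x111a3e–0x111a9c** (lines 3208, 3474): the common epilogue — the seven stores that zero the 48 poisoned shadow
bytes (`ShadowInv.epilogue_ra`), `add rsp, 0xb88`, six pops, `ret`: the function has RETURNED with its postcondition. -/
def Seg15 (Lay : Layout) (μ : Microarch) (u₀ : State) : Prop :=
  ∀ (others : List Obj) (frames : List (Nat × FrameLayout)) (len : Nat) (Ar : Arena) (stored room : Int)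
      (mode : Nat) (ysz : Nat → Nat) (u : State) (ret : Word) (v : State),
    At15 u₀ others frames len Ar stored room mode ysz u ret v →
    ReachVia Lay μ Vorbis.WayInv v (Returned (Vorbis.conv u₀) (vorbis_decode_packet_rest.spec others frames len Ar stored room mode ysz) u ret)

end vorbis_decode_packet_rest

end Vorbis.Spec
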